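-- pv_equiv track=rewrite | github.com/nguyenvulebinh/speaker-attribution | ensemble_diarization/core/pipeline.py | _split_sentence_ranges
-- ===== SOURCE A (Python) =====
-- from typing import Any, Dict, List, Optional, Sequence, Tuple
--
-- _SENT_END_PUNCT = (".", "?", "!")
--
-- def _split_sentence_ranges(words: Sequence[str]) -> List[Tuple[int, int]]:
--     if not words:
--         return []
--     ranges: List[Tuple[int, int]] = []
--     start = 0
--     for i, w in enumerate(words):
--         if w.endswith(_SENT_END_PUNCT):
--             ranges.append((start, i))
--             start = i + 1
--     if start <= len(words) - 1:
--         ranges.append((start, len(words) - 1))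
--     return ranges
-- ===== SOURCE B (Python) =====
-- from typing import List, Optional, Sequence, Tuple
--
-- _SENT_END_PUNCT = (".", "?", "!")
--
-- def _split_sentence_ranges(words: Sequence[str]) -> List[Tuple[int, int]]:
--     def first_end(rest: Sequence[str]) -> Optional[int]:
--         for j, w in enumerate(rest):
--             if w.endswith(_SENT_END_PUNCT):
--                 return j
--         return None
--
--     def rec(rest: Sequence[str], start: int) -> List[Tuple[int, int]]:
--         if not rest:
--             return []
--         j = first_end(rest)
--         if j is None:
--             return [(start, start + len(rest) - 1)]
--         return [(start, start + j)] + rec(rest[j + 1:], start + j + 1)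
--
--     return rec(list(words), 0)
-- ===== Notes on version B (the rewrite author's own statement) =====
-- stated objective: alternative
-- what changed: B is recursive sentence-chunking: it locates the first sentence-ending word, emits that chunk's range, and recurses on the remaining slice with an updated offset, instead of A's single iterative loop that accumulates ranges while tracking a running start and patches a trailing range afterwards.
import Mathlib
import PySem

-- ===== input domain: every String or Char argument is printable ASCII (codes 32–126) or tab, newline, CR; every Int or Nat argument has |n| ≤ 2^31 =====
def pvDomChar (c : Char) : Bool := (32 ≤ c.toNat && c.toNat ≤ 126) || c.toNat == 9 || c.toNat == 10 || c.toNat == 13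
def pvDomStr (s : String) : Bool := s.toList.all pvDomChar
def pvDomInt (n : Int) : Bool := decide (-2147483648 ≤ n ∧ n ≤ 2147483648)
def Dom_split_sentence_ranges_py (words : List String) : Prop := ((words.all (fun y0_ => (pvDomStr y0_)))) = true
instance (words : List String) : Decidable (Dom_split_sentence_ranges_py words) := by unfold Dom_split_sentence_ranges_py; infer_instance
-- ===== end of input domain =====

-- B: recursive sentence-chunking (find first sentence end, emit one range, recurse on the rest) instead of A's stateful accumulator loop; same cost.

-- ===== PORT A =====
-- w.endswith(_SENT_END_PUNCT)
def pvIsEnd (w : String) : Bool :=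
  PySem.Str.endswith w "." || PySem.Str.endswith w "?" || PySem.Str.endswith w "!"

-- the `for i, w in enumerate(words)` loop, carrying (ranges, start)
def pvALoop : List String → Int → Int → List (Int × Int) → (List (Int × Int) × Int)
  | [], _, start, ranges => (ranges, start)
  | w :: ws, i, start, ranges =>
    if pvIsEnd w then pvALoop ws (i + 1) (i + 1) (ranges ++ [(start, i)])
    else pvALoop ws (i + 1) start ranges

def split_sentence_ranges_py (words : List String) : List (Int × Int) :=
  if words = [] then []
  else
    let r := pvALoop words 0 0 []
    if r.2 ≤ (words.length : Int) - 1 then r.1 ++ [(r.2, (words.length : Int) - 1)]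
    else r.1

-- ===== PORT B =====
-- Source B's first_end: the index of the first word ending with sentence punctuation, None if absent
def pvFirstEnd : List String → Option Nat
  | [] => none
  | w :: ws => if pvIsEnd w then some 0 else (pvFirstEnd ws).map (· + 1)

theorem pvFirstEnd_lt : ∀ (ws : List String) (j : Nat), pvFirstEnd ws = some j → j < ws.length := by
  intro ws
  induction ws with
  | nil => intro j h; simp [pvFirstEnd] at h
  | cons w ws ih =>
    intro j h
    simp only [pvFirstEnd] at h
    split at h
    · simp at h ⊢; omega
    · cases hj : pvFirstEnd ws with
      | none => simp [hj] at h
      | some k => simp [hj] at h; have := ih k hj; simp; omega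

-- Source B's rec(rest, start); rest[j+1:] with j+1 ≥ 0 is List.drop (j+1)
def pvBRec (rest : List String) (start : Int) : List (Int × Int) :=
  if rest = [] then []
  else
    match h : pvFirstEnd rest with
    | none => [(start, start + rest.length - 1)]
    | some j => (start, start + j) :: pvBRec (rest.drop (j + 1)) (start + j + 1)
termination_by rest.length
decreasing_by
  have := pvFirstEnd_lt rest j h
  simp [List.length_drop]; omega

def split_sentence_ranges_py_alt (words : List String) : List (Int × Int) :=
  pvBRec words 0

-- ===== PRECONDITION & SPEC =====
def Spec_split_sentence_ranges_py (words : List String) (out : List (Int × Int)) : Prop := out = split_sentence_ranges_py_alt words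
instance (words : List String) (out : List (Int × Int)) : Decidable (Spec_split_sentence_ranges_py words out) := by unfold Spec_split_sentence_ranges_py; infer_instance

-- ===== CLAIM (what is proved, stated in full; the proofs are below) =====
def Claim_equal_split_sentence_ranges_py : Prop := ∀ (words : List String), Dom_split_sentence_ranges_py words → Spec_split_sentence_ranges_py words (split_sentence_ranges_py words)

-- ===== LEMMAS AND PROOFS =====

-- A's semantics generalised to a suffix starting at index/start i (the pair of A's loop state plus the trailing patch)
def pvAOff (ws : List String) (i : Int) : List (Int × Int) :=
  let r := pvALoop ws i i []
  if r.2 ≤ i + ws.length - 1 then r.1 ++ [(r.2, i + ws.length - 1)] else r.1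

theorem pvALoop_acc (ws : List String) : ∀ (i s : Int) (acc : List (Int × Int)),
    pvALoop ws i s acc = (acc ++ (pvALoop ws i s []).1, (pvALoop ws i s []).2) := by
  induction ws with
  | nil => intro i s acc; simp [pvALoop]
  | cons w ws ih =>
    intro i s acc
    simp only [pvALoop]
    by_cases h : pvIsEnd w = true
    · simp only [h, if_true]
      rw [ih (i+1) (i+1) (acc ++ [(s, i)]), ih (i+1) (i+1) ([] ++ [(s, i)])]
      simp
    · simp only [h]
      exact ih (i+1) s acc

-- if no word in ws ends a sentence, A's loop is the identity on its state
theorem pvALoop_none (ws : List String) (h : pvFirstEnd ws = none) :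
    ∀ (i s : Int) (acc : List (Int × Int)), pvALoop ws i s acc = (acc, s) := by
  induction ws with
  | nil => intro i s acc; simp [pvALoop]
  | cons w ws ih =>
    intro i s acc
    simp only [pvFirstEnd] at h
    split at h
    · simp at h
    · cases hj : pvFirstEnd ws with
      | some k => simp [hj] at h
      | none =>
        simp only [pvALoop]
        rename_i hw
        simp only [hw]
        exact ih hj (i+1) s acc

-- A's loop up to and including the first sentence end, then the rest
theorem pvALoop_first (ws : List String) : ∀ (j : Nat), pvFirstEnd ws = some j →
    ∀ (i s : Int) (acc : List (Int × Int)),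
    pvALoop ws i s acc = pvALoop (ws.drop (j + 1)) (i + j + 1) (i + j + 1) (acc ++ [(s, i + j)]) := by
  induction ws with
  | nil => intro j h; simp [pvFirstEnd] at h
  | cons w ws ih =>
    intro j h i s acc
    simp only [pvFirstEnd] at h
    split at h
    · rename_i hw
      have hj : j = 0 := by simp_all
      subst hj
      simp only [pvALoop, hw, if_true]
      simp
    · rename_i hw
      cases hk : pvFirstEnd ws with
      | none => simp [hk] at h
      | some k =>
        have hj : j = k + 1 := by simp [hk] at h; omega
        subst hj
        simp only [pvALoop, hw, Bool.false_eq_true, if_false]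
        rw [ih k hk (i+1) s acc]
        have e1 : i + 1 + k = i + (k + 1 : Nat) := by push_cast; ring
        have e2 : i + 1 + k + 1 = i + (k + 1 : Nat) + 1 := by push_cast; ring
        simp only [List.drop_succ_cons, e1]

-- pvAOff satisfies exactly pvBRec's recursion
theorem pvAOff_eq_pvBRec : ∀ (n : Nat) (ws : List String), ws.length = n → ∀ (i : Int), pvAOff ws i = pvBRec ws i := by
  intro n
  induction n using Nat.strong_induction_on with
  | _ n ih =>
    intro ws hlen i
    by_cases hw : ws = []
    · subst hw
      simp [pvAOff, pvALoop, pvBRec]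
    · rw [pvBRec, if_neg hw]
      split
      next hfe =>
        have hlen1 : 0 < ws.length := List.length_pos_of_ne_nil hw
        simp only [pvAOff, pvALoop_none ws hfe i i []]
        have hc : i ≤ i + (ws.length : Int) - 1 := by omega
        simp [hc]
      next j hfe =>
        have hj : j < ws.length := pvFirstEnd_lt ws j hfe
        have hrest : (ws.drop (j + 1)).length = ws.length - (j + 1) := by
          simp [List.length_drop]
        have hlt : (ws.drop (j + 1)).length < n := by omega
        have := ih _ hlt (ws.drop (j + 1)) rfl (i + j + 1)
        rw [← this]
        clear this
        simp only [pvAOff, pvALoop_first ws j hfe i i []]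
        rw [pvALoop_acc]
        have elen : i + (ws.length : Int) - 1 = (i + j + 1) + ((ws.drop (j + 1)).length : Int) - 1 := by
          rw [hrest]; omega
        simp only [List.nil_append, elen]
        split <;> rfl

-- ===== VERDICT (by name: the statement is the Claim_ definition above) =====
theorem split_sentence_ranges_py_spec : Claim_equal_split_sentence_ranges_py := by
  intro words _
  unfold Spec_split_sentence_ranges_py split_sentence_ranges_py split_sentence_ranges_py_alt
  rw [← pvAOff_eq_pvBRec words.length words rfl 0]
  by_cases hw : words = []
  · subst hw; simp [pvAOff, pvALoop]
  · simp only [hw, if_false, pvAOff]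
    norm_num
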